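-- pv_equiv track=rewrite | github.com/sj-asm/energomera | energomera.py | data_encode
-- ===== SOURCE A (Python) =====
-- def data_encode(msg):
--    sdata = ''
--    if msg['head']:
--       sdata += '\x01' + msg['head']
--    if msg['body']:
--       sdata += '\x02' + msg['body']
--    sdata += '\x03'
--
--    # Calculate LRC ex. data_decode
--    lrc = 0x00
--    lrc_add = False
--    for i in range(0, len(sdata)):
--       if sdata[i] == '\x01':
--          lrc_add = True
--       elif sdata[i] == '\x02':
--          if lrc_add:
--             lrc = (lrc + ord(sdata[i])) & 0x7f
--          else:
--             lrc_add = True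
--       elif sdata[i] == '\x03':
--          lrc_add = False
--          lrc = (lrc + ord(sdata[i])) & 0x7f
--       else:
--          if lrc_add:
--             lrc = (lrc + ord(sdata[i])) & 0x7f
--
--    # Addition of the calculated LRC in the string to send
--    sdata += chr(lrc)
--
--    return sdata
-- ===== SOURCE B (Python) =====
-- def data_encode(msg):
--     head = msg['head']
--     body = msg['body']
--     parts = []
--     lrc = 0
--     if head:
--         parts.append('\x01' + head)
--         lrc = sum(map(ord, head))
--     if body:
--         parts.append('\x02' + body)
--         lrc += sum(map(ord, body))
--         if head:
--             lrc += 0x02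
--     lrc = (lrc + 0x03) & 0x7f
--     return ''.join(parts) + '\x03' + chr(lrc)
-- ===== Notes on version B (the rewrite author's own statement) =====
-- stated objective: simpler
-- what changed: B computes the LRC from sums of the head/body parts in the same pass that assembles the frame (masking once at the end), removing A's second scan over the built string with its lrc_add state-machine flag.
import Mathlib
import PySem

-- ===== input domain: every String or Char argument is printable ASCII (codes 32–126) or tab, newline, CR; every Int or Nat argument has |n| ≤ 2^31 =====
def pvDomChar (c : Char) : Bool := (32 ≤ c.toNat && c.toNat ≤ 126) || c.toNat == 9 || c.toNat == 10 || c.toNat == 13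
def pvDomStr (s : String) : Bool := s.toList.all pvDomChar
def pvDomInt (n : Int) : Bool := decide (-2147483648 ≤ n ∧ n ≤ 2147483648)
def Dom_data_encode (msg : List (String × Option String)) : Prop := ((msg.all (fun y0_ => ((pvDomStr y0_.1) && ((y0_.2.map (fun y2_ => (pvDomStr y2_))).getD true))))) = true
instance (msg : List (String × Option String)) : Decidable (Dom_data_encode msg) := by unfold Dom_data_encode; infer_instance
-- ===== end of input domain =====

-- B computes the LRC in the same pass that assembles the frame (sums of the parts plus the
-- frame bytes, masked once at the end) instead of A's second scan with a state-machine flag.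

-- ===== PORT A =====
-- Python truthiness of a dict value that is None or a string
def pvTruthy (v : Option String) : Bool :=
  match v with
  | none => false
  | some s => !s.toList.isEmpty

-- one step of A's LRC loop body (the if/elif chain, in order)
def lrcStep (st : Nat × Bool) (c : Char) : Nat × Bool :=
  if c = '\x01' then (st.1, true)
  else if c = '\x02' then
    (if st.2 then ((st.1 + c.toNat) &&& 0x7f, st.2) else (st.1, true))
  else if c = '\x03' then ((st.1 + c.toNat) &&& 0x7f, false)
  else (if st.2 then ((st.1 + c.toNat) &&& 0x7f, st.2) else st)

def data_encode (msg : List (String × Option String)) : String :=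
  let head := ((PySem.Dict.mk msg).get? "head").getD none   -- msg['head']; KeyError excluded by Pre_
  let body := ((PySem.Dict.mk msg).get? "body").getD none   -- msg['body']
  let sdata : List Char :=
    (if pvTruthy head then '\x01' :: (head.getD "").toList else [])
    ++ (if pvTruthy body then '\x02' :: (body.getD "").toList else [])
    ++ ['\x03']
  let r := sdata.foldl lrcStep (0, false)
  String.mk (sdata ++ [Char.ofNat r.1])

-- ===== PORT B =====
-- sum(map(ord, s))
def sumOrd (l : List Char) : Nat := (l.map Char.toNat).sum

def data_encode_alt (msg : List (String × Option String)) : String :=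
  let head := ((PySem.Dict.mk msg).get? "head").getD none
  let body := ((PySem.Dict.mk msg).get? "body").getD none
  let hs := (head.getD "").toList
  let bs := (body.getD "").toList
  let th := pvTruthy head
  let tb := pvTruthy body
  let parts : List Char :=
    (if th then '\x01' :: hs else []) ++ (if tb then '\x02' :: bs else [])
  let lrc0 : Nat :=
    (if th then sumOrd hs else 0)
    + (if tb then sumOrd bs + (if th then 0x02 else 0) else 0)
  let lrc := (lrc0 + 0x03) &&& 0x7f
  String.mk (parts ++ ['\x03', Char.ofNat lrc])

-- ===== PRECONDITION & SPEC =====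
-- Pre_ excludes exactly the inputs on which A raises KeyError: dicts missing the 'head' or 'body' key.
def Pre_data_encode (msg : List (String × Option String)) : Prop :=
  ((PySem.Dict.mk msg).get? "head").isSome = true ∧ ((PySem.Dict.mk msg).get? "body").isSome = true
instance (msg : List (String × Option String)) : Decidable (Pre_data_encode msg) := by unfold Pre_data_encode; infer_instance
def pvWitness_data_encode : (List (String × Option String)) := [("head", some "A"), ("body", some "xy")]

def Spec_data_encode (msg : List (String × Option String)) (out : String) : Prop := out = data_encode_alt msg
instance (msg : List (String × Option String)) (out : String) : Decidable (Spec_data_encode msg out) := by unfold Spec_data_encode; infer_instance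

-- ===== CLAIM (what is proved, stated in full; the proofs are below) =====
def Claim_equal_data_encode : Prop := ∀ (msg : List (String × Option String)), Dom_data_encode msg → Pre_data_encode msg → Spec_data_encode msg (data_encode msg)

-- ===== LEMMAS AND PROOFS =====

lemma and127_eq_mod (x : Nat) : x &&& 127 = x % 128 :=
  Nat.and_two_pow_sub_one_eq_mod x 7

-- A's loop over a run of ordinary characters (no \x01..\x03) with the flag set just masks in their sum
lemma fold_true (l : List Char) (h : ∀ c ∈ l, 4 ≤ c.toNat) (lrc : Nat) (hl : lrc < 128) :
    l.foldl lrcStep (lrc, true) = ((lrc + sumOrd l) % 128, true) := by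
  induction l generalizing lrc with
  | nil => simp [sumOrd, Nat.mod_eq_of_lt hl]
  | cons c t ih =>
    have hc : 4 ≤ c.toNat := h c (by simp)
    have h1 : c ≠ '\x01' := by rintro rfl; simp [Char.toNat] at hc
    have h2 : c ≠ '\x02' := by rintro rfl; simp [Char.toNat] at hc
    have h3 : c ≠ '\x03' := by rintro rfl; simp [Char.toNat] at hc
    have : lrcStep (lrc, true) c = ((lrc + c.toNat) % 128, true) := by
      simp [lrcStep, h1, h2, h3, and127_eq_mod]
    rw [List.foldl_cons, this, ih (fun d hd => h d (by simp [hd])) _ (Nat.mod_lt _ (by omega))]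
    simp [sumOrd]
    omega

-- a value looked up in msg satisfies the domain bound on its characters
lemma dom_val (msg : List (String × Option String)) (k : String) (hd : Dom_data_encode msg) :
    ∀ c ∈ (((((PySem.Dict.mk msg).get? k).getD none).getD "").toList), 4 ≤ c.toNat := by
  induction msg with
  | nil => simp [PySem.Dict.get?]
  | cons p t ih =>
    unfold Dom_data_encode at hd ih
    simp only [List.all_cons, Bool.and_eq_true] at hd
    rw [PySem.Dict.get?_mk_cons]
    by_cases hk : p.1 == k
    · simp only [hk, if_pos]
      cases hv : p.2 with
      | none => simp
      | some s =>
        intro c hc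
        have := hd.1.2
        rw [hv] at this
        simp [pvDomStr, List.all_eq_true] at this
        have := this c hc
        simp [pvDomChar] at this
        omega
    · simp only [hk, if_neg, Bool.false_eq_true, not_false_iff]
      exact ih hd.2

-- ===== VERDICT (by name: the statement is the Claim_ definition above) =====
theorem data_encode_spec : Claim_equal_data_encode := by
  intro msg hdom _hpre
  unfold Spec_data_encode data_encode data_encode_alt
  simp only []
  set head := ((PySem.Dict.mk msg).get? "head").getD none with hh
  set body := ((PySem.Dict.mk msg).get? "body").getD none with hb
  have hhs : ∀ c ∈ (head.getD "").toList, 4 ≤ c.toNat := dom_val msg "head" hdom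
  have hbs : ∀ c ∈ (body.getD "").toList, 4 ≤ c.toNat := dom_val msg "body" hdom
  have e1 : lrcStep (0, false) '\x01' = (0, true) := by decide
  have e2 : lrcStep (0, false) '\x02' = (0, true) := by decide
  have e3 : ∀ n, lrcStep (n, true) '\x02' = ((n + 2) % 128, true) := by
    intro n; simp [lrcStep, Char.toNat, and127_eq_mod]
  have e4 : ∀ n, lrcStep (n, true) '\x03' = ((n + 3) % 128, false) := by
    intro n; simp [lrcStep, Char.toNat, and127_eq_mod]
  have e4' : lrcStep (0, false) '\x03' = (3, false) := by decide
  by_cases th : pvTruthy head = true <;> by_cases tb : pvTruthy body = true <;>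
      simp only [th, tb, if_pos, if_neg, Bool.false_eq_true, not_false_iff,
        List.nil_append, List.append_nil, List.cons_append, List.foldl_cons, List.foldl_append,
        List.foldl_nil]
  · -- head and body both present
    rw [e1, fold_true _ hhs 0 (by omega), e3, fold_true _ hbs _ (Nat.mod_lt _ (by omega)), e4]
    simp only [List.append_assoc, List.cons_append, List.nil_append]
    have harith : ((((0 + sumOrd (head.getD "").toList) % 128 + 2) % 128 + sumOrd (body.getD "").toList) % 128 + 3) % 128
        = sumOrd (head.getD "").toList + (sumOrd (body.getD "").toList + 2) + 3 &&& 127 := by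
      rw [and127_eq_mod]; omega
    rw [harith]
  · -- head only
    rw [e1, fold_true _ hhs 0 (by omega), e4]
    simp only [List.append_assoc, List.cons_append, List.nil_append]
    have harith : (((0 + sumOrd (head.getD "").toList) % 128 + 3) % 128)
        = sumOrd (head.getD "").toList + 0 + 3 &&& 127 := by
      rw [and127_eq_mod]; omega
    rw [harith]
  · -- body only
    rw [e2, fold_true _ hbs 0 (by omega), e4]
    simp only [List.append_assoc, List.cons_append, List.nil_append]
    have harith : (((0 + sumOrd (body.getD "").toList) % 128 + 3) % 128)
        = 0 + (sumOrd (body.getD "").toList + 0) + 3 &&& 127 := by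
      rw [and127_eq_mod]; omega
    rw [harith]
  · -- neither
    rw [e4']
    congr 2
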